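-- pv_equiv track=rewrite | github.com/Elrinth/vbdoom | prepare_shotgun_sprites.py | generate_black_canvas
-- ===== SOURCE A (Python) =====
-- def generate_black_canvas(canvas):
--     """Generate a black-layer canvas from the red canvas.
--
--     The black canvas contains the FULL weapon body (all pixel indices
--     preserved) PLUS a 2-pixel dilated dark border around the weapon
--     silhouette. This matches the pistol's approach:
--
--     When rendered with GPLT2 (0x84):
--       idx 0 -> transparent
--       idx 1 -> dark (visible as black)
--       idx 2 -> transparent (medium pixels disappear!)
--       idx 3 -> medium (bright pixels become dimmer)
--
--     Interior tiles will be identical to red tiles and deduplicate to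
--     zero additional cost. Only edge tiles with the dilated border add
--     to the tile count.
--     """
--     h = len(canvas)
--     w = len(canvas[0]) if h > 0 else 0
--     black = [[0] * w for _ in range(h)]
--
--     # Copy full weapon body
--     for y in range(h):
--         for x in range(w):
--             black[y][x] = canvas[y][x]
--
--     # Add 1-pixel dilated dark border (8-directional)
--     for y in range(h):
--         for x in range(w):
--             if canvas[y][x] != 0:
--                 continue  # only fill transparent pixels
--             # Check 8 neighbors for any non-transparent pixel
--             has_neighbor = False
--             for dy in (-1, 0, 1):
--                 for dx in (-1, 0, 1):
--                     if dy == 0 and dx == 0: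
--                         continue
--                     ny, nx = y + dy, x + dx
--                     if 0 <= ny < h and 0 <= nx < w and canvas[ny][nx] != 0:
--                         has_neighbor = True
--                         break
--                 if has_neighbor:
--                     break
--             if has_neighbor:
--                 black[y][x] = 1  # dark outline pixel
--
--     return black
-- ===== SOURCE B (Python) =====
-- def generate_black_canvas(canvas):
--     """Separable 3x3 dilation: horizontal 1D dilation of the nonzero mask,
--     then vertical 1D dilation, then compose the output per pixel."""
--     h = len(canvas)
--     w = len(canvas[0]) if h > 0 else 0
--     mask = [[canvas[y][x] != 0 for x in range(w)] for y in range(h)]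
--     horiz = [[(x > 0 and row[x - 1]) or row[x] or (x + 1 < w and row[x + 1])
--               for x in range(w)] for row in mask]
--     dil = [[(y > 0 and horiz[y - 1][x]) or horiz[y][x] or (y + 1 < h and horiz[y + 1][x])
--             for x in range(w)] for y in range(h)]
--     return [[canvas[y][x] if mask[y][x] else (1 if dil[y][x] else 0)
--              for x in range(w)] for y in range(h)]
-- ===== Notes on version B (the rewrite author's own statement) =====
-- stated objective: alternative
-- what changed: Replaces A's per-background-pixel gather over the 8 neighbour offsets (with continue/early-break) by a separable 3x3 dilation of the nonzero mask: one horizontal 1D pass, one vertical 1D pass, then a per-pixel composition.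
import Mathlib
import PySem

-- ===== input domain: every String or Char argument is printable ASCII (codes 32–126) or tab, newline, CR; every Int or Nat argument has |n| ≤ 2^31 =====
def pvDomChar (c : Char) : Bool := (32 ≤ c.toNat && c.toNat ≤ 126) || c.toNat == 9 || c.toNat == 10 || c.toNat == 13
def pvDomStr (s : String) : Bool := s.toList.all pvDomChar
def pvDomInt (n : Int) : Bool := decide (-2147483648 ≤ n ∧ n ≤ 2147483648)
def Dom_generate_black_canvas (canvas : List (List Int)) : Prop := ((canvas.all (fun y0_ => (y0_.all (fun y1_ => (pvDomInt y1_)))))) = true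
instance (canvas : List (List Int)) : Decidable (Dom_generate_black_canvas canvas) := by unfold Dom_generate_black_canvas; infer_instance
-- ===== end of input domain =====

-- B replaces A's per-background-pixel scan of the 8 neighbours by a separable
-- 3x3 dilation (horizontal pass, then vertical pass); objective: alternative.

-- ===== PORT A =====
-- canvas[y][x] for in-range y,x (only used under the bounds guards / Pre_)
def pvCell (c : List (List Int)) (y x : Nat) : Int := (c.getD y []).getD x 0

-- the dy/dx double loop with its `continue` and early `break` (the break only
-- short-circuits; `List.any` has the same short-circuit semantics)
def pvHasNeighbor (c : List (List Int)) (h w y x : Nat) : Bool :=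
  ([-1, 0, 1] : List Int).any fun dy =>
    ([-1, 0, 1] : List Int).any fun dx =>
      if dy = 0 ∧ dx = 0 then false
      else
        let ny : Int := (y : Int) + dy
        let nx : Int := (x : Int) + dx
        decide (0 ≤ ny) && decide (ny < (h : Int)) && decide (0 ≤ nx) && decide (nx < (w : Int)) &&
          (pvCell c ny.toNat nx.toNat != 0)

def generate_black_canvas (canvas : List (List Int)) : List (List Int) :=
  let h := canvas.length
  let w := if h > 0 then (canvas.headD []).length else 0
  -- copy full weapon body
  let black := (List.range h).map fun y => (List.range w).map fun x => pvCell canvas y x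
  -- add 1-pixel dilated dark border (8-directional)
  (List.range h).map fun y => (List.range w).map fun x =>
    if pvCell canvas y x ≠ 0 then pvCell black y x   -- continue: keep black[y][x]
    else if pvHasNeighbor canvas h w y x then 1
    else pvCell black y x

-- ===== PORT B =====
def pvMget (m : List (List Bool)) (y x : Nat) : Bool := (m.getD y []).getD x false

-- mask = [[canvas[y][x] != 0 for x in range(w)] for y in range(h)]
def pvMask (c : List (List Int)) (h w : Nat) : List (List Bool) :=
  (List.range h).map fun y => (List.range w).map fun x => pvCell c y x != 0

-- horiz = [[(x>0 and row[x-1]) or row[x] or (x+1<w and row[x+1]) ...] for row in mask]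
def pvHoriz (mask : List (List Bool)) (h w : Nat) : List (List Bool) :=
  (List.range h).map fun y => (List.range w).map fun x =>
    (decide (0 < x) && pvMget mask y (x - 1)) || pvMget mask y x ||
      (decide (x + 1 < w) && pvMget mask y (x + 1))

-- dil = [[(y>0 and horiz[y-1][x]) or horiz[y][x] or (y+1<h and horiz[y+1][x]) ...]]
def pvDil (horiz : List (List Bool)) (h w : Nat) : List (List Bool) :=
  (List.range h).map fun y => (List.range w).map fun x =>
    (decide (0 < y) && pvMget horiz (y - 1) x) || pvMget horiz y x ||
      (decide (y + 1 < h) && pvMget horiz (y + 1) x)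

def generate_black_canvas_alt (canvas : List (List Int)) : List (List Int) :=
  let h := canvas.length
  let w := if h > 0 then (canvas.headD []).length else 0
  let mask := pvMask canvas h w
  let dil := pvDil (pvHoriz mask h w) h w
  (List.range h).map fun y => (List.range w).map fun x =>
    if pvMget mask y x then pvCell canvas y x
    else if pvMget dil y x then 1 else 0

-- ===== PRECONDITION & SPEC =====
-- Python A (and B) index every row at all columns 0..w-1 where w = len(canvas[0]),
-- so a row shorter than the first row raises IndexError; exactly those are excluded.
def Pre_generate_black_canvas (canvas : List (List Int)) : Prop :=
  ∀ row ∈ canvas, (canvas.headD []).length ≤ row.length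
instance (canvas : List (List Int)) : Decidable (Pre_generate_black_canvas canvas) := by unfold Pre_generate_black_canvas; infer_instance
def pvWitness_generate_black_canvas : List (List Int) := [[0, 2, 0], [0, 0, 0]]

def Spec_generate_black_canvas (canvas : List (List Int)) (out : List (List Int)) : Prop := out = generate_black_canvas_alt canvas
instance (canvas : List (List Int)) (out : List (List Int)) : Decidable (Spec_generate_black_canvas canvas out) := by unfold Spec_generate_black_canvas; infer_instance

-- ===== CLAIM (what is proved, stated in full; the proofs are below) =====
def Claim_equal_generate_black_canvas : Prop := ∀ (canvas : List (List Int)), Dom_generate_black_canvas canvas → Pre_generate_black_canvas canvas → Spec_generate_black_canvas canvas (generate_black_canvas canvas)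

-- ===== LEMMAS AND PROOFS =====

theorem pv_mget_grid (g : Nat → Nat → Bool) (h w y x : Nat) :
    pvMget ((List.range h).map fun y => (List.range w).map fun x => g y x) y x
      = (decide (y < h) && decide (x < w) && g y x) := by
  by_cases hy : y < h
  · by_cases hx : x < w <;> simp [pvMget, hy, hx]
  · simp [pvMget, hy]


theorem mget_mask (c : List (List Int)) (h w y x : Nat) :
    pvMget (pvMask c h w) y x
      = (decide (y < h) && decide (x < w) && (pvCell c y x != 0)) := by
  exact pv_mget_grid (fun y x => pvCell c y x != 0) h w y x

theorem mget_horiz (m : List (List Bool)) (h w y x : Nat) :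
    pvMget (pvHoriz m h w) y x
      = (decide (y < h) && decide (x < w) &&
          ((decide (0 < x) && pvMget m y (x - 1)) || pvMget m y x ||
            (decide (x + 1 < w) && pvMget m y (x + 1)))) := by
  exact pv_mget_grid _ h w y x

theorem mget_dil (m : List (List Bool)) (h w y x : Nat) :
    pvMget (pvDil m h w) y x
      = (decide (y < h) && decide (x < w) &&
          ((decide (0 < y) && pvMget m (y - 1) x) || pvMget m y x ||
            (decide (y + 1 < h) && pvMget m (y + 1) x))) := by
  exact pv_mget_grid _ h w y x




set_option maxHeartbeats 2000000 in
theorem nb_eq (c : List (List Int)) (h w y x : Nat) (hy : y < h) (hx : x < w)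
    (hc : pvCell c y x = 0) :
    pvHasNeighbor c h w y x = pvMget (pvDil (pvHoriz (pvMask c h w) h w) h w) y x := by
  rw [Bool.eq_iff_iff, mget_dil]
  simp only [mget_horiz, mget_mask, pvHasNeighbor, List.any_cons, List.any_nil]
  norm_num
  have e1 : ((y : Int) + -1).toNat = y - 1 := by omega
  have f1 : ((x : Int) + -1).toNat = x - 1 := by omega
  have g1 : (0:Int) ≤ (x:Int) + 1 := by omega
  have g2 : (0:Int) ≤ (y:Int) + 1 := by omega
  have g3 : ((x:Int) + 1 < (w:Int)) ↔ x + 1 < w := by omega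
  have g4 : ((y:Int) + 1 < (h:Int)) ↔ y + 1 < h := by omega
  have d1 : y - 1 < h := by omega
  have d2 : x - 1 < w := by omega
  have q1 : (1 ≤ y) ↔ (0 < y) := Iff.rfl
  have q2 : (1 ≤ x) ↔ (0 < x) := Iff.rfl
  simp only [e1, f1, g3, g4, q1, q2]
  by_cases h1 : 0 < y <;> by_cases h2 : y + 1 < h <;> by_cases h3 : 0 < x <;> by_cases h4 : x + 1 < w <;>
    simp [h1, h2, h3, h4, hy, hx, hy.le, hx.le, d1, d2, g1, g2, hc, or_assoc]

theorem blackcell (c : List (List Int)) (h w y x : Nat) (hy : y < h) (hx : x < w) :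
    pvCell ((List.range h).map fun y => (List.range w).map fun x => pvCell c y x) y x
      = pvCell c y x := by
  simp [pvCell, hy, hx]

theorem generate_black_canvas_spec : Claim_equal_generate_black_canvas := by
  intro canvas _ _
  unfold Spec_generate_black_canvas
  simp only [generate_black_canvas, generate_black_canvas_alt]
  apply List.map_congr_left
  intro y hy
  rw [List.mem_range] at hy
  apply List.map_congr_left
  intro x hx
  rw [List.mem_range] at hx
  rw [blackcell canvas _ _ y x hy hx, mget_mask]
  simp only [hy, hx, decide_true, Bool.true_and]
  by_cases hc : pvCell canvas y x = 0
  · rw [nb_eq canvas _ _ y x hy hx hc]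
    simp [hc]
  · simp [hc]
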